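-- pv_equiv track=rewrite | github.com/ttzytt/PyAutoGrade | tests/Block 4/tested_code/2064/Unit 1/List functions/list_functions.py | weird_double
-- ===== SOURCE A (Python) =====
-- def weird_double(numbers):
--     weird_double = []
--     i = 0
--     while(i < len(numbers)):
--         if(numbers[i] % 3 == 0):
--             j = 0
--             while((j < 4) and (i < len(numbers))):
--                 weird_double.append(numbers[i])
--                 i += 1
--                 j += 1
--         else:
--             weird_double.append(numbers[i] * 2)
--             i+= 1
--
--     return weird_double
-- ===== SOURCE B (Python) =====
-- def weird_double(numbers):
--     result = []
--     skip = 0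
--     for x in numbers:
--         if skip > 0:
--             result.append(x)
--             skip -= 1
--         elif x % 3 == 0:
--             result.append(x)
--             skip = 3
--         else:
--             result.append(x * 2)
--     return result
-- ===== Notes on version B (the rewrite author's own statement) =====
-- stated objective: simpler
-- what changed: Replaced the nested index-driven while-loops with a single flat for-loop over the elements that carries an integer skip countdown to copy the three elements following a multiple of 3 verbatim.
import Mathlib
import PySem

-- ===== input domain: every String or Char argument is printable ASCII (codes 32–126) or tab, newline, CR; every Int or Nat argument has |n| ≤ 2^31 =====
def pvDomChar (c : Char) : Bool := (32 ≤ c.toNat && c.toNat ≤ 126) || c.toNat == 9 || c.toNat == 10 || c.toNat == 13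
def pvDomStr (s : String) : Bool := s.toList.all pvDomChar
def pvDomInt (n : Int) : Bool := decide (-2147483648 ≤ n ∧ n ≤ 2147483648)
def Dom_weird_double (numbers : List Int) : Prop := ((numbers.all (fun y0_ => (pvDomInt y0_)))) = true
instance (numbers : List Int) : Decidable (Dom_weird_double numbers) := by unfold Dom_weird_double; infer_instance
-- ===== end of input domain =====

-- B is a simpler decomposition: one flat for-loop with a skip countdown replaces A's nested index-driven while-loops; return values proved equal on all inputs.

-- ===== PORT A =====
-- inner while loop: while (j < 4) and (i < len(numbers)): append numbers[i]; i += 1; j += 1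
-- ported with the remaining count 4 - j as structural fuel (j < 4 ⟺ fuel > 0);
-- returns the final i together with the appended elements
def pvAInner (numbers : List Int) : Nat → Nat → Nat × List Int
  | 0, i => (i, [])
  | fuel + 1, i =>
    if h : i < numbers.length then
      let r := pvAInner numbers fuel (i + 1)
      (r.1, numbers[i]'h :: r.2)
    else (i, [])

-- outer while loop over index i; fuel bounds the iteration count (each iteration
-- advances i by at least 1, so numbers.length iterations always suffice)
def pvALoop (numbers : List Int) : Nat → Nat → List Int
  | 0, _ => []
  | fuel + 1, i =>
    if h : i < numbers.length then
      if PySem.Int.mod (numbers[i]'h) 3 == 0 then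
        let r := pvAInner numbers 4 i
        r.2 ++ pvALoop numbers fuel r.1
      else
        numbers[i]'h * 2 :: pvALoop numbers fuel (i + 1)
    else []

def weird_double (numbers : List Int) : List Int := pvALoop numbers numbers.length 0

-- ===== PORT B =====
-- one step of Source B's for-loop body, state = (skip, result)
def pvBStep (st : Nat × List Int) (x : Int) : Nat × List Int :=
  if st.1 > 0 then (st.1 - 1, st.2 ++ [x])
  else if PySem.Int.mod x 3 == 0 then (3, st.2 ++ [x])
  else (st.1, st.2 ++ [x * 2])

def weird_double_alt (numbers : List Int) : List Int :=
  (numbers.foldl pvBStep (0, [])).2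

-- ===== PRECONDITION & SPEC =====
def Spec_weird_double (numbers : List Int) (out : List Int) : Prop := out = weird_double_alt numbers
instance (numbers : List Int) (out : List Int) : Decidable (Spec_weird_double numbers out) := by unfold Spec_weird_double; infer_instance

-- ===== CLAIM (what is proved, stated in full; the proofs are below) =====
def Claim_equal_weird_double : Prop := ∀ (numbers : List Int), Dom_weird_double numbers → Spec_weird_double numbers (weird_double numbers)

-- ===== LEMMAS AND PROOFS =====

-- proof-side characterisation of B's fold: the list it produces from skip state s
def gB : Nat → List Int → List Int
  | _, [] => []
  | s + 1, x :: l => x :: gB s l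
  | 0, x :: l => if PySem.Int.mod x 3 == 0 then x :: gB 3 l else x * 2 :: gB 0 l

theorem foldl_gB : ∀ (l : List Int) (s : Nat) (a : List Int),
    (List.foldl pvBStep (s, a) l).2 = a ++ gB s l := by
  intro l
  induction l with
  | nil => intro s a; simp [gB]
  | cons x l ih =>
    intro s a
    match s with
    | 0 =>
      by_cases h : (3 : Int) ∣ x
      · simp [pvBStep, gB, ih, h]
      · simp [pvBStep, gB, ih, h]
    | s + 1 =>
      simp [pvBStep, gB, ih]

theorem gB_skip : ∀ (s : Nat) (l : List Int),
    gB s l = l.take s ++ gB 0 (l.drop s) := by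
  intro s
  induction s with
  | zero => intro l; simp
  | succ s ih =>
    intro l
    cases l with
    | nil => simp [gB]
    | cons x l => simp [gB, ih]

theorem pvAInner_char (numbers : List Int) :
    ∀ (k i : Nat), i ≤ numbers.length →
      pvAInner numbers k i = (min (i + k) numbers.length, (numbers.drop i).take k) := by
  intro k
  induction k with
  | zero =>
    intro i hi
    have hmin : min (i + 0) numbers.length = i := by omega
    rw [pvAInner, hmin]
    simp
  | succ k ih =>
    intro i hi
    rw [pvAInner]
    by_cases h : i < numbers.length
    · rw [dif_pos h]
      simp only [ih (i + 1) (by omega)]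
      have h1 : i + 1 + k = i + (k + 1) := by omega
      rw [List.drop_eq_getElem_cons h, List.take_succ_cons, h1]
    · rw [dif_neg h]
      have hi' : i = numbers.length := by omega
      subst hi'
      have hmin : min (numbers.length + (k + 1)) numbers.length = numbers.length := by omega
      rw [hmin, List.drop_length]
      simp

theorem pvALoop_eq_gB (numbers : List Int) :
    ∀ (n i : Nat), numbers.length - i ≤ n → i ≤ numbers.length →
      pvALoop numbers n i = gB 0 (numbers.drop i) := by
  intro n
  induction n with
  | zero =>
    intro i hn hi
    have hi' : i = numbers.length := by omega
    rw [pvALoop, hi', List.drop_length]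
    rfl
  | succ n ih =>
    intro i hn hi
    by_cases h : i < numbers.length
    · have hdrop : numbers.drop i = numbers[i] :: numbers.drop (i + 1) :=
        List.drop_eq_getElem_cons h
      by_cases hm : PySem.Int.mod (numbers[i]'h) 3 == 0
      · have hinner : pvAInner numbers 4 i
            = (min (i + 4) numbers.length, (numbers.drop i).take 4) :=
          pvAInner_char numbers 4 i (by omega)
        have hD : (numbers.drop (i + 1)).drop 3 = numbers.drop (min (i + 4) numbers.length) := by
          rw [List.drop_drop]
          by_cases hle : i + 4 ≤ numbers.length
          · have : min (i + 4) numbers.length = i + 4 := by omega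
            rw [this]
          · rw [List.drop_eq_nil_of_le (by omega), List.drop_eq_nil_of_le (by omega)]
        rw [pvALoop, dif_pos h, if_pos hm]
        simp only [hinner]
        rw [ih (min (i + 4) numbers.length) (by omega) (by omega), ← hD, hdrop]
        simp only [gB, if_pos hm, gB_skip 3 (numbers.drop (i + 1)), List.take_succ_cons,
          List.cons_append]
      · rw [pvALoop, dif_pos h, if_neg hm]
        rw [ih (i + 1) (by omega) (by omega), hdrop]
        simp only [gB, if_neg hm]
    · have hi' : i = numbers.length := by omega
      rw [pvALoop, dif_neg h, hi', List.drop_length]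
      rfl

-- ===== VERDICT (by name: the statement is the Claim_ definition above) =====
theorem weird_double_spec : Claim_equal_weird_double := by
  intro numbers _
  unfold Spec_weird_double weird_double weird_double_alt
  rw [pvALoop_eq_gB numbers numbers.length 0 (by omega) (by omega)]
  rw [foldl_gB]
  simp
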